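-- pv_equiv track=rewrite | github.com/or-raito/raito-dashboard | scripts/matching_rules.py | validate_prefix_order
-- ===== SOURCE A (Python) =====
-- def validate_prefix_order(prefixes: list[str]) -> list[str]:
--     """Check for ordering violations. Returns list of error messages (empty = OK).
--
--     An ordering violation occurs when a shorter prefix appears before a
--     longer one that starts with it (e.g., 'כרמלה' before 'חן כרמלה').
--     """
--     errors = []
--     for i, p1 in enumerate(prefixes):
--         for p2 in prefixes[i + 1:]:
--             if p2.startswith(p1) and len(p2) > len(p1):
--                 errors.append(
--                     f"Ordering violation: '{p1}' (pos {i}) appears before "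
--                     f"longer prefix '{p2}' which starts with it"
--                 )
--     return errors
-- ===== SOURCE B (Python) =====
-- def validate_prefix_order(prefixes: list[str]) -> list[str]:
--     """Check for ordering violations. Returns list of error messages (empty = OK)."""
--     # Index every proper prefix of every word once, then read the matches off
--     # the index instead of re-scanning the tail of the list for each position.
--     index = {}
--     for j, w in enumerate(prefixes):
--         for k in range(len(w)):
--             index.setdefault(w[:k], []).append((j, w))
--     errors = []
--     for i, p1 in enumerate(prefixes):
--         for j, p2 in index.get(p1, []):
--             if j > i:
--                 errors.append(
--                     f"Ordering violation: '{p1}' (pos {i}) appears before "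
--                     f"longer prefix '{p2}' which starts with it"
--                 )
--     return errors
-- ===== Notes on version B (the rewrite author's own statement) =====
-- stated objective: faster
-- what changed: B builds a dictionary mapping every proper prefix of every word to the (position, word) pairs having it, then reads each position's violations off that index, instead of A's rescan of the whole list tail with startswith for every position.
import Mathlib
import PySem

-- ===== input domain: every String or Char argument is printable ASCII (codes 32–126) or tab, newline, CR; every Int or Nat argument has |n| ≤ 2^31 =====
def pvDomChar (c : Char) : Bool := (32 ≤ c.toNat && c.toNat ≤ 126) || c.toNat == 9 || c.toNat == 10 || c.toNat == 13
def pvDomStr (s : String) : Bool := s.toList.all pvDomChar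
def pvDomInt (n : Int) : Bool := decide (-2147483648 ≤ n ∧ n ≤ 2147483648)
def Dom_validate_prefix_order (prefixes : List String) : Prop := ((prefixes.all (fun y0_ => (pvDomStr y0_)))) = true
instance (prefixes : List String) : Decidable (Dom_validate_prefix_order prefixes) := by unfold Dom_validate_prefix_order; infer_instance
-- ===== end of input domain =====

-- B replaces A's rescan of the whole list tail per position by a dictionary that indexes every
-- proper prefix of every word once (objective: faster; measured).

-- the f-string both Pythons format (same literal text in A and B)
def pvMsg (p1 : String) (i : Int) (p2 : String) : String :=
  "Ordering violation: '" ++ p1 ++ "' (pos " ++ PySem.Int.toStr i ++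
    ") appears before longer prefix '" ++ p2 ++ "' which starts with it"

-- ===== PORT A =====
def validate_prefix_order (prefixes : List String) : List String :=
  (PySem.List.enumerate prefixes).foldl
    (fun errors ip =>
      (PySem.List.slice prefixes (some (ip.1 + 1)) none).foldl
        (fun errors p2 =>
          if PySem.Str.startswith p2 ip.2 && decide (PySem.Str.len ip.2 < PySem.Str.len p2) then
            errors ++ [pvMsg ip.2 ip.1 p2]
          else errors)
        errors)
    []

-- ===== PORT B =====
def validate_prefix_order_alt (prefixes : List String) : List String :=
  let index : PySem.Dict String (List (Int × String)) :=
    (PySem.List.enumerate prefixes).foldl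
      (fun d jw =>
        (PySem.List.pyRange 0 (PySem.Str.len jw.2)).foldl
          (fun d k => d.modify (PySem.Str.slice jw.2 none (some k)) [] (· ++ [(jw.1, jw.2)]))
          d)
      PySem.Dict.empty
  (PySem.List.enumerate prefixes).foldl
    (fun errors ip =>
      (index.getD ip.2 []).foldl
        (fun errors jp =>
          if decide (jp.1 > ip.1) then errors ++ [pvMsg ip.2 ip.1 jp.2] else errors)
        errors)
    []

-- ===== PRECONDITION & SPEC =====
def Spec_validate_prefix_order (prefixes : List String) (out : List String) : Prop := out = validate_prefix_order_alt prefixes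
instance (prefixes : List String) (out : List String) : Decidable (Spec_validate_prefix_order prefixes out) := by unfold Spec_validate_prefix_order; infer_instance

-- ===== CLAIM (what is proved, stated in full; the proofs are below) =====
def Claim_equal_validate_prefix_order : Prop := ∀ (prefixes : List String), Dom_validate_prefix_order prefixes → Spec_validate_prefix_order prefixes (validate_prefix_order prefixes)

-- ===== LEMMAS AND PROOFS =====

def pvProp (p1 w : String) : Bool :=
  PySem.Str.startswith w p1 && decide (PySem.Str.len p1 < PySem.Str.len w)
theorem pvProp_iff (p1 w : String) :
    pvProp p1 w = true ↔ w.toList.take p1.length = p1.toList ∧ p1.length < w.length := by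
  simp [pvProp, PySem.Chars.startswith_iff, PySem.Str.len_eq, List.prefix_iff_eq_take]
  exact fun _ => eq_comm

theorem pvSliceEq (w p1 : String) (k : Nat) :
    (PySem.Str.slice w none (some (k:Int)) == p1) = decide (w.toList.take k = p1.toList) := by
  rw [Bool.beq_eq_decide_eq]
  congr 1
  rw [← String.toList_inj]
  simp [PySem.Str.toList_slice, PySem.List.slice_to_natCast]

theorem pvFilterRange (w p1 : String) :
    (PySem.List.pyRange 0 (PySem.Str.len w)).filter
        (fun k => PySem.Str.slice w none (some k) == p1)
      = if pvProp p1 w then [(p1.length : Int)] else [] := by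
  rw [PySem.Str.len_eq, PySem.List.pyRange_zero_natCast, List.filter_map]
  have hcong : ∀ k ∈ List.range w.toList.length,
      ((fun k : Int => PySem.Str.slice w none (some k) == p1) ∘ (fun k : Nat => (k:Int))) k
        = (decide (w.toList.take p1.length = p1.toList) && (k == p1.length)) := by
    intro k hk
    simp only [Function.comp, pvSliceEq]
    simp only [List.mem_range, String.length_toList] at hk
    by_cases he : w.toList.take k = p1.toList
    · have hlen : k = p1.length := by
        have := congrArg List.length he
        simp [List.length_take, String.length_toList] at this
        omega
      simp [he, ← hlen]
    · by_cases hkm : k = p1.length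
      · simp [he, ← hkm]
      · simp [he, hkm]
  rw [List.filter_congr hcong]
  by_cases hC : w.toList.take p1.length = p1.toList
  · simp only [hC, decide_true, Bool.true_and]
    rw [List.filter_beq, String.length_toList, List.count_range]
    by_cases hlt : p1.length < w.length
    · simp [hlt, pvProp_iff, hC]
    · simp only [hlt]
      have hfalse : ¬ (pvProp p1 w = true) := by rw [pvProp_iff]; exact fun h => hlt h.2
      simp [hfalse]
  · have hfalse : ¬ (pvProp p1 w = true) := by rw [pvProp_iff]; exact fun h => hC h.1
    simp [hfalse, hC]

def pvPairList (prefixes : List String) : List (String × (Int × String)) :=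
  (PySem.List.enumerate prefixes).flatMap
    (fun jw => (PySem.List.pyRange 0 (PySem.Str.len jw.2)).map
      (fun k => (PySem.Str.slice jw.2 none (some k), (jw.1, jw.2))))

theorem pvIndex_getD (prefixes : List String) (p1 : String) :
    (((PySem.List.enumerate prefixes).foldl
      (fun d jw =>
        (PySem.List.pyRange 0 (PySem.Str.len jw.2)).foldl
          (fun d k => d.modify (PySem.Str.slice jw.2 none (some k)) [] (· ++ [(jw.1, jw.2)]))
          d)
      PySem.Dict.empty).getD p1 [])
    = (PySem.List.enumerate prefixes).flatMap
        (fun jw => if pvProp p1 jw.2 then [(jw.1, jw.2)] else []) := by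
  have h1 : ((PySem.List.enumerate prefixes).foldl
      (fun d jw =>
        (PySem.List.pyRange 0 (PySem.Str.len jw.2)).foldl
          (fun d k => d.modify (PySem.Str.slice jw.2 none (some k)) [] (· ++ [(jw.1, jw.2)]))
          d)
      PySem.Dict.empty)
      = List.foldl (fun d p => d.modify p.1 [] (· ++ [p.2])) PySem.Dict.empty (pvPairList prefixes) := by
    rw [pvPairList, List.foldl_flatMap]
    congr 1
    funext d jw
    rw [List.foldl_map]
  rw [h1, PySem.Dict.getD_foldl_modify_append, pvPairList, List.filter_flatMap, List.map_flatMap]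
  rw [PySem.Dict.getD_of_not_contains _ _ (PySem.Dict.contains_empty p1), List.nil_append]
  refine List.flatMap_congr ?_
  intro jw _
  rw [List.filter_map]
  have : ((fun p : String × (Int × String) => p.1 == p1) ∘
      (fun k : Int => (PySem.Str.slice jw.2 none (some k), (jw.1, jw.2))))
      = fun k => PySem.Str.slice jw.2 none (some k) == p1 := rfl
  rw [this, pvFilterRange]
  by_cases h : pvProp p1 jw.2 <;> simp [h]


theorem pvFlatMap_enum_snd {α β : Type} (l : List α) (s : Int) (f : α → List β) :
    (PySem.List.enumerate l s).flatMap (fun jw => f jw.2) = l.flatMap f := by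
  induction l generalizing s with
  | nil => rfl
  | cons x xs ih => simp [PySem.List.enumerate_cons, ih]

theorem pvFlatMap_if_singleton {α β : Type} (l : List α) (p : α → Bool) (f : α → β) :
    l.flatMap (fun x => if p x then [f x] else []) = (l.filter p).map f := by
  induction l with
  | nil => rfl
  | cons x xs ih => by_cases h : p x <;> simp [h, ih]

theorem pvPerIndex (prefixes : List String) (k : Nat) (hk : k < prefixes.length) (p1 : String) :
    ((PySem.List.slice prefixes (some ((k:Int)+1)) none).filter (pvProp p1)).map (pvMsg p1 (k:Int))
    = (((PySem.List.enumerate prefixes).flatMap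
          (fun jw => if pvProp p1 jw.2 then [(jw.1, jw.2)] else [])).filter
        (fun jp => decide (jp.1 > (k:Int)))).map (fun jp => pvMsg p1 (k:Int) jp.2) := by
  have hcast : ((k:Int)+1) = ((k+1 : Nat) : Int) := by push_cast; ring
  rw [hcast, PySem.List.slice_from_natCast]
  rw [List.filter_flatMap, List.map_flatMap]
  conv_rhs => rw [show prefixes = prefixes.take (k+1) ++ prefixes.drop (k+1) from (List.take_append_drop _ _).symm]
  rw [PySem.List.enumerate_append, List.flatMap_append]
  have hlen : (prefixes.take (k+1)).length = k+1 := by simp; omega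
  have h0 : ((PySem.List.enumerate (prefixes.take (k+1)) 0).flatMap
      (fun jw => ((if pvProp p1 jw.2 then [(jw.1, jw.2)] else []).filter
        (fun jp => decide (jp.1 > (k:Int)))).map (fun jp => pvMsg p1 (k:Int) jp.2))) = [] := by
    rw [List.flatMap_congr (g := fun _ => []) ?_]
    · simp
    · intro jw hjw
      rw [PySem.List.mem_enumerate_iff] at hjw
      obtain ⟨m, hm, rfl⟩ := hjw
      simp
      intro _
      rw [hlen] at hm
      omega
  rw [h0, List.nil_append]
  have h1 : ∀ jw ∈ PySem.List.enumerate (prefixes.drop (k+1)) (0 + (prefixes.take (k+1)).length),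
      ((if pvProp p1 jw.2 then [(jw.1, jw.2)] else []).filter
        (fun jp => decide (jp.1 > (k:Int)))).map (fun jp => pvMsg p1 (k:Int) jp.2)
      = if pvProp p1 jw.2 then [pvMsg p1 (k:Int) jw.2] else [] := by
    intro jw hjw
    rw [PySem.List.mem_enumerate_iff] at hjw
    obtain ⟨m, hm, rfl⟩ := hjw
    have hc : ((k:Int) < 0 + ((prefixes.take (k+1)).length:Int) + (m:Int)) := by
      rw [hlen]; push_cast; omega
    by_cases hp : pvProp p1 (prefixes.drop (k+1))[m] = true
    · rw [if_pos hp, if_pos hp]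
      have hc2 : (k:Int) < min ((k:Int)+1) (prefixes.length:Int) + (m:Int) := by
        have hkl : (k:Int) < (prefixes.length:Int) := by exact_mod_cast hk
        omega
      simp [hc2]
    · rw [if_neg hp, if_neg hp]
      simp
  rw [List.flatMap_congr h1,
    pvFlatMap_enum_snd (prefixes.drop (k+1)) _
      (fun w => if pvProp p1 w = true then [pvMsg p1 (k:Int) w] else []),
    pvFlatMap_if_singleton]

theorem pv_main (prefixes : List String) :
    validate_prefix_order prefixes = validate_prefix_order_alt prefixes := by
  unfold validate_prefix_order validate_prefix_order_alt
  simp only [PySem.List.foldl_append_if, PySem.List.foldl_append_eq_flatMap, List.nil_append]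
  simp only [pvIndex_getD]
  refine List.flatMap_congr ?_
  intro ip hip
  rw [PySem.List.mem_enumerate_iff] at hip
  obtain ⟨k, hk, rfl⟩ := hip
  simp only [zero_add]
  exact pvPerIndex prefixes k hk prefixes[k]

-- ===== VERDICT (by name: the statement is the Claim_ definition above) =====
theorem validate_prefix_order_spec : Claim_equal_validate_prefix_order := by
  intro prefixes _
  exact pv_main prefixes
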